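-- pv_equiv track=rewrite | github.com/alperiox/fatush | fatush/utils/script.py | process_raw_text
-- ===== SOURCE A (Python) =====
-- def process_raw_text(text):
--     lines = list(map(lambda x: x.strip(), text.split("\n")))
--     code_block_flag = False
--     cleaned_lines = []
--     for line in lines:
--         if line.startswith("```"):
--             code_block_flag = not code_block_flag
--
--         if not (code_block_flag or line.startswith("```")):
--             cleaned_lines.append(line)
--
--     return "\n".join(cleaned_lines)
-- ===== SOURCE B (Python) =====
-- def process_raw_text(text):
--     lines = [x.strip() for x in text.split("\n")]
--     # split the stripped lines into segments at each fence line (fences discarded)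
--     segments = []
--     current = []
--     for line in lines:
--         if line.startswith("```"):
--             segments.append(current)
--             current = []
--         else:
--             current.append(line)
--     segments.append(current)
--     # even-indexed segments are the regions outside code blocks
--     return "\n".join(line for seg in segments[0::2] for line in seg)
-- ===== Notes on version B (the rewrite author's own statement) =====
-- stated objective: alternative
-- what changed: Replaced the stateful single-pass boolean-flag filter by a two-phase split-then-select: partition the stripped lines into segments delimited by fence lines, keep the even-indexed segments, and flatten them.
import Mathlib
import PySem

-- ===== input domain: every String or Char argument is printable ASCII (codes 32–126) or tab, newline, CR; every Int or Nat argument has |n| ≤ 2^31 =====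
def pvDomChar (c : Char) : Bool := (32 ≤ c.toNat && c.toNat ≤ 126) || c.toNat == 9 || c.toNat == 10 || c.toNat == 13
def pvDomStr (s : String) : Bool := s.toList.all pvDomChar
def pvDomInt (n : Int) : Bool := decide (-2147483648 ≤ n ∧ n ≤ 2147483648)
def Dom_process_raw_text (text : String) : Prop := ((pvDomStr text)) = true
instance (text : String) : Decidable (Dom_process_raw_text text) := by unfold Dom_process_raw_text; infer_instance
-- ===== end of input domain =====

-- B replaces A's stateful boolean-flag filter by splitting the stripped lines into
-- fence-delimited segments and keeping the even-indexed ones (objective: alternative).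

-- ===== PORT A =====
def process_raw_text (text : String) : String :=
  let lines := ((PySem.Str.split? text "\n").getD []).map (fun x => PySem.Str.strip x)
  let st := lines.foldl (fun (st : Bool × List String) line =>
    let flag := if PySem.Str.startswith line "```" then !st.1 else st.1
    if !(flag || PySem.Str.startswith line "```") then (flag, st.2 ++ [line])
    else (flag, st.2)) (false, [])
  PySem.Str.join "\n" st.2

-- ===== PORT B =====
-- port of Source B's segments[0::2] (every second element starting at index 0)
def everyOther {α : Type} : List α → List α
  | [] => []
  | a :: r => a :: skipOne r
where skipOne : List α → List α
  | [] => []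
  | _ :: r => everyOther r

def process_raw_text_alt (text : String) : String :=
  let lines := ((PySem.Str.split? text "\n").getD []).map (fun x => PySem.Str.strip x)
  let st := lines.foldl (fun (st : List (List String) × List String) line =>
    if PySem.Str.startswith line "```" then (st.1 ++ [st.2], ([] : List String))
    else (st.1, st.2 ++ [line])) ([], [])
  let segments := st.1 ++ [st.2]
  PySem.Str.join "\n" ((everyOther segments).flatMap id)

-- ===== PRECONDITION & SPEC =====
def Spec_process_raw_text (text : String) (out : String) : Prop := out = process_raw_text_alt text
instance (text : String) (out : String) : Decidable (Spec_process_raw_text text out) := by unfold Spec_process_raw_text; infer_instance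

-- ===== CLAIM (what is proved, stated in full; the proofs are below) =====
def Claim_equal_process_raw_text : Prop := ∀ (text : String), Dom_process_raw_text text → Spec_process_raw_text text (process_raw_text text)

-- ===== LEMMAS AND PROOFS =====

-- reference: which lines are kept, as a direct recursion over the lines
def pvKeep (flag : Bool) : List String → List String
  | [] => []
  | l :: ls =>
    if PySem.Str.startswith l "```" then pvKeep (!flag) ls
    else if flag then pvKeep flag ls else l :: pvKeep flag ls

-- the segments produced by B's loop, as a direct recursion
def pvSegsOf : List String → List (List String)
  | [] => [[]]
  | l :: ls =>
    if PySem.Str.startswith l "```" then [] :: pvSegsOf ls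
    else match pvSegsOf ls with
      | [] => []        -- unreachable
      | h :: t => (l :: h) :: t

lemma pvSegsOf_ne_nil (ls : List String) : pvSegsOf ls ≠ [] := by
  induction ls with
  | nil => simp [pvSegsOf]
  | cons l ls ih =>
    simp only [pvSegsOf]
    split
    · simp
    · cases hs : pvSegsOf ls with
      | nil => exact absurd hs ih
      | cons a t => simp

lemma foldA_eq (lines : List String) (flag : Bool) (acc : List String) :
    (lines.foldl (fun (st : Bool × List String) line =>
      let f := if PySem.Str.startswith line "```" then !st.1 else st.1
      if !(f || PySem.Str.startswith line "```") then (f, st.2 ++ [line])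
      else (f, st.2)) (flag, acc)).2 = acc ++ pvKeep flag lines := by
  induction lines generalizing flag acc with
  | nil => simp [pvKeep]
  | cons l ls ih =>
    simp only [List.foldl_cons] at *
    simp at ih
    by_cases h : PySem.Str.startswith l "```"
    · simp at h
      cases flag with
      | true => simp [pvKeep, h, ih]
      | false => simp [pvKeep, h, ih]
    · simp at h
      cases flag with
      | true => simp [pvKeep, h, ih]
      | false => simp [pvKeep, h, ih]

lemma foldB_eq (lines : List String) (segs : List (List String)) (cur : List String) :
    (let st := lines.foldl (fun (st : List (List String) × List String) line =>
      if PySem.Str.startswith line "```" then (st.1 ++ [st.2], ([] : List String))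
      else (st.1, st.2 ++ [line])) (segs, cur)
     st.1 ++ [st.2]) =
    segs ++ (match pvSegsOf lines with
      | [] => []
      | h :: t => (cur ++ h) :: t) := by
  induction lines generalizing segs cur with
  | nil => simp [pvSegsOf]
  | cons l ls ih =>
    simp only [List.foldl_cons] at *
    simp at ih
    by_cases h : PySem.Str.startswith l "```"
    · simp at h
      cases hs : pvSegsOf ls with
      | nil => exact absurd hs (pvSegsOf_ne_nil ls)
      | cons a t => simp [pvSegsOf, h, ih, hs]
    · simp at h
      cases hs : pvSegsOf ls with
      | nil => exact absurd hs (pvSegsOf_ne_nil ls)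
      | cons a t => simp [pvSegsOf, h, ih, hs]

lemma select_eq_keep (ls : List String) :
    ((everyOther (pvSegsOf ls)).flatMap id = pvKeep false ls) ∧
    ((everyOther.skipOne (pvSegsOf ls)).flatMap id = pvKeep true ls) := by
  induction ls with
  | nil => simp [pvSegsOf, everyOther, everyOther.skipOne, pvKeep]
  | cons l ls ih =>
    by_cases h : PySem.Str.startswith l "```"
    · simp at h
      constructor
      · simpa [pvSegsOf, pvKeep, h, everyOther, everyOther.skipOne] using ih.2
      · simpa [pvSegsOf, pvKeep, h, everyOther, everyOther.skipOne] using ih.1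
    · simp at h
      cases hs : pvSegsOf ls with
      | nil => exact absurd hs (pvSegsOf_ne_nil ls)
      | cons a t =>
        rw [hs] at ih
        constructor
        · simpa [pvSegsOf, pvKeep, h, hs, everyOther, everyOther.skipOne] using ih.1
        · simpa [pvSegsOf, pvKeep, h, hs, everyOther, everyOther.skipOne] using ih.2

-- ===== VERDICT (by name: the statement is the Claim_ definition above) =====
theorem process_raw_text_spec : Claim_equal_process_raw_text := by
  intro text _
  unfold Spec_process_raw_text process_raw_text process_raw_text_alt
  simp only
  rw [foldA_eq, foldB_eq]
  cases hs : pvSegsOf (((PySem.Str.split? text "\n").getD []).map (fun x => PySem.Str.strip x)) with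
  | nil => exact absurd hs (pvSegsOf_ne_nil _)
  | cons a t =>
    have hsel := (select_eq_keep (((PySem.Str.split? text "\n").getD []).map (fun x => PySem.Str.strip x))).1
    rw [hs] at hsel
    simp [hsel]
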